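-- pv_equiv track=rewrite | github.com/ellismckenzielee/codewars-python | simple_equation_reversal.py | solve
-- ===== SOURCE A (Python) =====
-- def solve(eq):
--     output = ""
--     numbers = ""
--     for char in list(eq[::-1]):
--         if char not in ['0','1','2','3','4','5','6','7','8','9']:
--             output += ''.join(list(numbers)[::-1])
--             output += (char)
--             numbers = ""
--         else:
--             numbers += char
--     output += numbers[::-1]
--     return output
-- ===== SOURCE B (Python) =====
-- def solve(eq):
--     tokens = []
--     i = 0
--     n = len(eq)
--     while i < n:
--         if '0' <= eq[i] <= '9':
--             j = i
--             while j < n and '0' <= eq[j] <= '9':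
--                 j += 1
--             tokens.append(eq[i:j])
--             i = j
--         else:
--             tokens.append(eq[i])
--             i += 1
--     return ''.join(reversed(tokens))
-- ===== Notes on version B (the rewrite author's own statement) =====
-- stated objective: idiomatic
-- what changed: B tokenizes the string into maximal digit runs and single non-digit characters in one forward pass, then joins the token list in reverse, instead of A's backward char-by-char scan with a digit accumulator, quadratic string concatenation and repeated reversals.
import Mathlib
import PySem

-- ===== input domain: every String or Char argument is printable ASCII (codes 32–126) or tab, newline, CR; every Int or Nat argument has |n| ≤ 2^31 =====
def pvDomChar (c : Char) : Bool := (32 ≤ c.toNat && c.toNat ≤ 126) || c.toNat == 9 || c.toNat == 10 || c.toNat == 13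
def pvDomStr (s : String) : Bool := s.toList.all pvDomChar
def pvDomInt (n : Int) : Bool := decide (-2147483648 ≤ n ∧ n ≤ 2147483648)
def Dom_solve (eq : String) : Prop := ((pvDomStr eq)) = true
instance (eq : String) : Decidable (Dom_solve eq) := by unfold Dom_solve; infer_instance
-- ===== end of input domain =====

-- B tokenizes into maximal digit runs and single non-digit characters, then joins the tokens in
-- reverse; A scans the reversed string char by char with a digit accumulator. Same return value.

-- ===== PORT A =====
-- A's digit list ['0',…,'9'] (strings modelled as Char lists throughout, exact for this task)
def solveDigits : List Char := ['0','1','2','3','4','5','6','7','8','9']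

-- one iteration of A's for-loop: state = (output, numbers)
def solveStep (st : List Char × List Char) (c : Char) : List Char × List Char :=
  if ¬ (c ∈ solveDigits) then (st.1 ++ st.2.reverse ++ [c], []) else (st.1, st.2 ++ [c])

def solve (eq : String) : String :=
  let st := eq.toList.reverse.foldl solveStep ([], [])
  String.ofList (st.1 ++ st.2.reverse)

-- ===== PORT B =====
-- B's digit test '0' <= c <= '9' (same set as A's list)
def digitTok (c : Char) : Bool := decide ('0' ≤ c) && decide (c ≤ '9')

-- B's tokenizer: a maximal digit run, or a single non-digit character
def tokens : List Char → List (List Char)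
  | [] => []
  | c :: cs =>
    if digitTok c then (c :: cs.takeWhile digitTok) :: tokens (cs.dropWhile digitTok)
    else [c] :: tokens cs
termination_by cs => cs.length
decreasing_by
  · exact Nat.lt_succ_of_le (cs.length_dropWhile_le digitTok)
  · exact Nat.lt_succ_self _

def solve_alt (eq : String) : String :=
  String.ofList ((tokens eq.toList).reverse.flatten)

-- ===== PRECONDITION & SPEC =====
def Spec_solve (eq : String) (out : String) : Prop := out = solve_alt eq
instance (eq : String) (out : String) : Decidable (Spec_solve eq out) := by unfold Spec_solve; infer_instance

-- ===== CLAIM (what is proved, stated in full; the proofs are below) =====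
def Claim_equal_solve : Prop := ∀ (eq : String), Dom_solve eq → Spec_solve eq (solve eq)

-- ===== LEMMAS AND PROOFS =====

-- A's membership test and B's range test agree
theorem mem_digits_iff (c : Char) : (c ∈ solveDigits) ↔ digitTok c = true := by
  constructor
  · intro h
    fin_cases h <;> decide
  · intro h
    simp only [digitTok, Bool.and_eq_true, decide_eq_true_eq] at h
    obtain ⟨h1, h2⟩ := h
    have hv1 : (48 : UInt32) ≤ c.val := h1
    have hv2 : c.val ≤ (57 : UInt32) := h2
    have hn1 : 48 ≤ c.val.toNat := hv1
    have hn2 : c.val.toNat ≤ 57 := hv2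
    have : c.val.toNat = 48 ∨ c.val.toNat = 49 ∨ c.val.toNat = 50 ∨ c.val.toNat = 51 ∨
        c.val.toNat = 52 ∨ c.val.toNat = 53 ∨ c.val.toNat = 54 ∨ c.val.toNat = 55 ∨
        c.val.toNat = 56 ∨ c.val.toNat = 57 := by omega
    have hchar : ∀ n, c.val.toNat = n → c = Char.ofNat n := by
      intro n hn
      have : c.toNat = n := hn
      subst this
      simp [Char.ofNat_toNat]
    rcases this with h|h|h|h|h|h|h|h|h|h <;>
      · rw [hchar _ h]; decide

-- unfolding B's tokenizer one step
theorem tokens_cons_pos (c : Char) (cs : List Char) (h : digitTok c = true) :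
    tokens (c :: cs) = (c :: cs.takeWhile digitTok) :: tokens (cs.dropWhile digitTok) := by
  rw [tokens, if_pos h]

theorem tokens_cons_neg (c : Char) (cs : List Char) (h : digitTok c = false) :
    tokens (c :: cs) = [c] :: tokens cs := by
  rw [tokens, if_neg (by simp [h])]

-- pulling the leading digit run off the token list
theorem tokens_take_drop (cs : List Char) :
    ((tokens (cs.dropWhile digitTok)).reverse.flatten) ++ cs.takeWhile digitTok
      = (tokens cs).reverse.flatten := by
  cases cs with
  | nil => simp [tokens]
  | cons c cs =>
    by_cases h : digitTok c = true
    · rw [tokens_cons_pos c cs h, List.dropWhile_cons_of_pos h, List.takeWhile_cons_of_pos h]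
      simp
    · have h' : digitTok c = false := by simpa using h
      rw [List.dropWhile_cons_of_neg (by simp [h']), List.takeWhile_cons_of_neg (by simp [h'])]
      simp

-- loop invariant for A's scan, read as a foldr over the original string
theorem foldr_step_eq (cs : List Char) :
    cs.foldr (fun c st => solveStep st c) ([], []) =
      ((tokens (cs.dropWhile digitTok)).reverse.flatten, (cs.takeWhile digitTok).reverse) := by
  induction cs with
  | nil => simp [tokens]
  | cons c cs ih =>
    rw [List.foldr_cons, ih]
    by_cases h : digitTok c = true
    · have hm : c ∈ solveDigits := (mem_digits_iff c).mpr h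
      rw [List.dropWhile_cons_of_pos h, List.takeWhile_cons_of_pos h]
      simp [solveStep, hm]
    · have hm : ¬ c ∈ solveDigits := fun hc => h ((mem_digits_iff c).mp hc)
      have h' : digitTok c = false := by simpa using h
      rw [List.dropWhile_cons_of_neg (by simp [h']), List.takeWhile_cons_of_neg (by simp [h']),
        tokens_cons_neg c cs h']
      simp only [solveStep, if_pos hm]
      rw [show (List.takeWhile digitTok cs).reverse.reverse = List.takeWhile digitTok cs from
        List.reverse_reverse _]
      rw [tokens_take_drop cs]
      simp

-- ===== VERDICT (by name: the statement is the Claim_ definition above) =====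
theorem solve_spec : Claim_equal_solve := by
  intro eq _
  show solve eq = solve_alt eq
  unfold solve solve_alt
  rw [List.foldl_reverse, foldr_step_eq]
  simp [← tokens_take_drop eq.toList]
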